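-- pv_equiv track=rewrite | github.com/ninepig/leecode_dd_2024 | company/zAmazon/oa/fulltimeList/channelQaulity.py | calculateMedianSum
-- ===== SOURCE A (Python) =====
-- from typing import List
-- import math
--
-- def medianOf(nums:List[int])->int:
--     n = len(nums)
--     m = int(n/2)
--     if n % 2 == 0: ##  1 2 3 4 5 6
--         return math.ceil((nums[m-1] + nums[m]) / 2)
--     else: ##  1 2 3 4 5
--         return (nums[(int((n-1)/2))])
--
-- def calculateMedianSum(packets:List[int], n:int) -> int:
--     if n > len(packets):return -1
--     if n == 0: return -1
--
--     packet_bucket = [] # [5], [1234]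
--
--     packets.sort()
--
--     while n > 0:
--         if n > 1:
--             biggest_item = packets.pop()
--             packet_bucket.append([biggest_item])
--         else:
--             packet_bucket.append(packets)
--         n -= 1
--
--
--     sum_of_qualities = 0
--     for p in packet_bucket:
--         sum_of_qualities += medianOf(p)
--
--     return sum_of_qualities
-- ===== SOURCE B (Python) =====
-- def calculateMedianSum(packets, n):
--     # Return-value equivalence only: A sorts/pops `packets` in place, B leaves it untouched.
--     if n <= 0 or n > len(packets):
--         return -1
--     s = sorted(packets)
--     m = len(s) - n + 1            # size of the remaining lower block
--     top = sum(s[m:])              # the n-1 largest packets, each its own median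
--     h = m // 2
--     if m % 2 == 1:
--         med = s[h]
--     else:
--         med = -(-(s[h - 1] + s[h]) // 2)   # ceil of the average of the two middle values
--     return top + med
-- ===== Notes on version B (the rewrite author's own statement) =====
-- stated objective: simpler
-- what changed: A pops the n-1 largest elements one by one into a list of singleton buckets and sums medianOf over them; B sorts once and reads the answer off by index arithmetic: sum of the top slice plus a direct two-index median of the lower block, with no bucket list, no pops and no loop.
-- outside the precondition, e.g. on calculateMedianSum([1, 2], -1): A returns 0, B returns -1
import Mathlib
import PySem

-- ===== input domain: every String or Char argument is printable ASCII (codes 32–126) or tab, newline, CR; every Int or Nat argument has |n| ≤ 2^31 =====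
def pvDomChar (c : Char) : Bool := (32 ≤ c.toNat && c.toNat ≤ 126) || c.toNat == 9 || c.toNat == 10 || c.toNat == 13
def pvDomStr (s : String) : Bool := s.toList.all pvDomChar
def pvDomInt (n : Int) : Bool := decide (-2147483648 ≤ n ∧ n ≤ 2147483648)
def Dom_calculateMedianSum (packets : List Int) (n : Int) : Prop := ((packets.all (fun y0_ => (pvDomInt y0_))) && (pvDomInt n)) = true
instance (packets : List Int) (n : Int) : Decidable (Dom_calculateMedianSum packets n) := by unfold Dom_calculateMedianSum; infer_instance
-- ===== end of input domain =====

-- B replaces A's pop-one-by-one bucket loop by index arithmetic on the sorted list (objective: simpler).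
-- Return-value equivalence only: the Python A sorts/pops `packets` in place, B leaves it untouched.

-- ===== PORT A =====
-- medianOf(nums): int(n/2) is truncdiv; math.ceil((a+b)/2) is exact here (|a+b| < 2^53) and
-- equals the integer ceiling division -((-(a+b)) // 2).
def pvMedianOf (nums : List Int) : Int :=
  let n : Int := (nums.length : Int)
  let m : Int := PySem.Int.truncdiv n 2
  if PySem.Int.mod n 2 = 0 then
    -(PySem.Int.floordiv (-(PySem.List.pyGetD nums (m - 1) 0 + PySem.List.pyGetD nums m 0)) 2)
  else
    PySem.List.pyGetD nums (PySem.Int.truncdiv (n - 1) 2) 0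

-- the while-loop of A, fuel = the remaining value of n (n > 1 ↔ fuel ≥ 2)
def pvALoop (packets : List Int) (bucket : List (List Int)) : Nat → List (List Int)
  | 0 => bucket
  | 1 => bucket ++ [packets]                    -- n == 1: append the remaining list itself
  | (k + 2) =>                                  -- n > 1: biggest_item = packets.pop()
    match PySem.List.pop? packets with
    | some (biggest, rest) => pvALoop rest (bucket ++ [[biggest]]) (k + 1)
    | none => bucket                            -- packets.pop() raises IndexError (never reached under Pre_)

def calculateMedianSum (packets : List Int) (n : Int) : Int :=
  if (packets.length : Int) < n then -1
  else if n = 0 then -1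
  else
    let sortedP := PySem.List.sorted packets (fun x => x) false
    let bucket := pvALoop sortedP [] n.toNat
    bucket.foldl (fun acc p => acc + pvMedianOf p) 0

-- ===== PORT B =====
def calculateMedianSum_alt (packets : List Int) (n : Int) : Int :=
  if n ≤ 0 ∨ (packets.length : Int) < n then -1
  else
    let s := PySem.List.sorted packets (fun x => x) false
    let m : Int := (s.length : Int) - n + 1
    let top := (PySem.List.slice s (some m) none).sum
    let h := PySem.Int.floordiv m 2
    let med :=
      if PySem.Int.mod m 2 = 1 then PySem.List.pyGetD s h 0
      else -(PySem.Int.floordiv (-(PySem.List.pyGetD s (h - 1) 0 + PySem.List.pyGetD s h 0)) 2)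
    top + med

-- ===== PRECONDITION & SPEC =====
-- Pre_ excludes negative n, outside the task's natural domain: there A returns 0 (its while
-- loop never runs, leftover accumulator), while B returns the -1 it uses for invalid n.
def Pre_calculateMedianSum (packets : List Int) (n : Int) : Prop := 0 ≤ n
instance (packets : List Int) (n : Int) : Decidable (Pre_calculateMedianSum packets n) := by unfold Pre_calculateMedianSum; infer_instance
def pvWitness_calculateMedianSum : List Int × Int := ([3, 1, 2, 7], 2)

def Spec_calculateMedianSum (packets : List Int) (n : Int) (out : Int) : Prop := out = calculateMedianSum_alt packets n
instance (packets : List Int) (n : Int) (out : Int) : Decidable (Spec_calculateMedianSum packets n out) := by unfold Spec_calculateMedianSum; infer_instance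

-- ===== CLAIM (what is proved, stated in full; the proofs are below) =====
def Claim_equal_calculateMedianSum : Prop := ∀ (packets : List Int) (n : Int), Dom_calculateMedianSum packets n → Pre_calculateMedianSum packets n → Spec_calculateMedianSum packets n (calculateMedianSum packets n)

-- ===== LEMMAS AND PROOFS =====

theorem pvMedianOf_singleton (x : Int) : pvMedianOf [x] = x := by
  have h2 : PySem.Int.truncdiv 0 2 = 0 := by decide
  simp [pvMedianOf, h2, PySem.List.pyGetD_zero_cons]

-- characterisation of A's bucket: top k elements as singletons (largest first), then the rest
theorem pvALoop_eq (k : Nat) : ∀ (cur : List Int) (bucket : List (List Int)), k < cur.length →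
    pvALoop cur bucket (k + 1)
      = bucket ++ ((cur.drop (cur.length - k)).reverse.map (fun x => [x]))
          ++ [cur.take (cur.length - k)] := by
  induction k with
  | zero => intro cur bucket h; simp [pvALoop]
  | succ k ih =>
    intro cur bucket h
    have hne : cur ≠ [] := by intro hc; simp [hc] at h
    obtain ⟨dl, x, hcur⟩ : ∃ dl x, cur = dl ++ [x] := ⟨cur.dropLast, cur.getLast hne, (List.dropLast_append_getLast hne).symm⟩
    subst hcur
    have hdl : k < dl.length := by simp at h; omega
    have hle : dl.length - k ≤ dl.length := by omega
    have hstep : pvALoop (dl ++ [x]) bucket (k + 2) = pvALoop dl (bucket ++ [[x]]) (k + 1) := by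
      rw [pvALoop, PySem.List.pop?_last]
    rw [hstep, ih dl (bucket ++ [[x]]) hdl]
    have hL : (dl ++ [x]).length - (k + 1) = dl.length - k := by simp
    rw [hL, List.drop_append_of_le_length hle, List.take_append_of_le_length hle]
    simp

-- cast helpers: Python's int(a/2), a // 2, a % 2 on a nonnegative a
theorem pv_truncdiv_cast (a : Nat) : PySem.Int.truncdiv (a : Int) 2 = ((a / 2 : Nat) : Int) := by
  have h := Int.tdiv_eq_ediv (a := (a : Int)) (b := 2)
  rw [if_pos (Or.inl (by positivity))] at h
  simp only [PySem.Int.truncdiv]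
  omega

theorem pvMedianOf_take (s : List Int) (m' : Nat) (h1 : 1 ≤ m') (h2 : m' ≤ s.length) :
    pvMedianOf (s.take m')
      = (if PySem.Int.mod (m' : Int) 2 = 1 then PySem.List.pyGetD s (PySem.Int.floordiv (m' : Int) 2) 0
         else -(PySem.Int.floordiv (-(PySem.List.pyGetD s (PySem.Int.floordiv (m' : Int) 2 - 1) 0
              + PySem.List.pyGetD s (PySem.Int.floordiv (m' : Int) 2) 0)) 2)) := by
  have hlen : (s.take m').length = m' := by simp; omega
  have hfd : PySem.Int.floordiv (m' : Int) 2 = ((m' / 2 : Nat) : Int) := by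
    rw [PySem.Int.floordiv_eq_ediv_of_pos (by omega)]; omega
  have hmod : PySem.Int.mod (m' : Int) 2 = ((m' % 2 : Nat) : Int) := by
    rw [PySem.Int.mod_eq_emod_of_pos (by omega)]; omega
  simp only [pvMedianOf]
  rw [hlen, pv_truncdiv_cast, hfd, hmod]
  by_cases hpar : m' % 2 = 1
  · -- odd length: the single middle element
    have hm1 : ((m' : Int) - 1) = ((m' - 1 : Nat) : Int) := by omega
    rw [if_neg (by omega : ¬ ((m' % 2 : Nat) : Int) = 0), if_pos (by omega : ((m' % 2 : Nat) : Int) = 1)]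
    rw [hm1, pv_truncdiv_cast]
    have he : (m' - 1) / 2 = m' / 2 := by omega
    rw [he]
    have hj : m' / 2 < m' := by omega
    rw [PySem.List.pyGetD_eq_getElem _ _ (by positivity) (by rw [hlen]; exact_mod_cast hj),
        PySem.List.pyGetD_eq_getElem _ _ (by positivity) (by exact_mod_cast lt_of_lt_of_le hj h2)]
    simp [List.getElem_take]
  · -- even length: ceiling of the mean of the two middle elements
    have hev : m' % 2 = 0 := by omega
    have h2le : 2 ≤ m' := by omega
    have hj1 : 1 ≤ m' / 2 := by omega
    have hj : m' / 2 < m' := by omega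
    rw [if_pos (by omega : ((m' % 2 : Nat) : Int) = 0), if_neg (by omega : ¬ ((m' % 2 : Nat) : Int) = 1)]
    have hgd1 : PySem.List.pyGetD (s.take m') (((m' / 2 : Nat) : Int) - 1) 0
        = PySem.List.pyGetD s (((m' / 2 : Nat) : Int) - 1) 0 := by
      rw [PySem.List.pyGetD_eq_getElem _ _ (by omega) (by rw [hlen]; omega),
          PySem.List.pyGetD_eq_getElem _ _ (by omega) (by omega)]
      simp [List.getElem_take]
    have hgd2 : PySem.List.pyGetD (s.take m') ((m' / 2 : Nat) : Int) 0
        = PySem.List.pyGetD s ((m' / 2 : Nat) : Int) 0 := by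
      rw [PySem.List.pyGetD_eq_getElem _ _ (by positivity) (by rw [hlen]; exact_mod_cast hj),
          PySem.List.pyGetD_eq_getElem _ _ (by positivity) (by exact_mod_cast lt_of_lt_of_le hj h2)]
      simp [List.getElem_take]
    rw [hgd1, hgd2]

-- ===== VERDICT (by name: the statement is the Claim_ definition above) =====
theorem calculateMedianSum_spec : Claim_equal_calculateMedianSum := by
  intro packets n _ hpre
  unfold Spec_calculateMedianSum calculateMedianSum calculateMedianSum_alt
  unfold Pre_calculateMedianSum at hpre
  by_cases hbig : (packets.length : Int) < n
  · simp [hbig]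
  · by_cases hzero : n = 0
    · simp [hzero]
    · have hn1 : 1 ≤ n := by omega
      simp only [if_neg hbig, if_neg hzero, if_neg (by omega : ¬ (n ≤ 0 ∨ (packets.length : Int) < n))]
      set s := PySem.List.sorted packets (fun x => x) false with hs
      have hlen : s.length = packets.length := PySem.List.length_sorted packets (fun x => x) false
      have hk : n.toNat = (n.toNat - 1) + 1 := by omega
      set k := n.toNat - 1 with hkdef
      have hklt : k < s.length := by omega
      rw [hk, pvALoop_eq k s [] hklt]
      set m' := s.length - k with hm'
      have hm : (s.length : Int) - n + 1 = (m' : Int) := by omega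
      rw [hm]
      rw [PySem.List.foldl_add]
      have h1 : 1 ≤ m' := by omega
      simp only [List.map_append, List.map_map, List.sum_append, List.map_reverse,
        List.sum_reverse, List.map_cons, List.map_nil, List.sum_cons, List.sum_nil]
      have hmap : ((s.drop m').map (pvMedianOf ∘ fun x => [x])) = s.drop m' := by
        simp [Function.comp_def, pvMedianOf_singleton]
      rw [hmap, pvMedianOf_take s m' h1 (by omega), PySem.List.slice_from_natCast]
      simp [add_comm]
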